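-- pv_equiv track=rewrite | github.com/ajdranse/adventOfCode | 2019/12.py | calc
-- ===== SOURCE A (Python) =====
-- def calc(positions):
--     velocities = [0] * len(positions)
--     first = tuple(positions) + tuple(velocities)
--     steps = 0
--     while True:
--         for idx in range(len(positions)):
--             for idx2 in range(len(positions)):
--                 if idx != idx2:
--                     if positions[idx] > positions[idx2]:
--                         velocities[idx] -= 1
--                     elif positions[idx] < positions[idx2]:
--                         velocities[idx] += 1
--         for idx in range(len(positions)):
--             positions[idx] += velocities[idx]
--
--         steps += 1
--         if first == (tuple(positions) + tuple(velocities)):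
--             return steps
-- ===== SOURCE B (Python) =====
-- def calc(positions):
--     n = len(positions)
--     velocities = [0] * n
--     first = tuple(positions) + tuple(velocities)
--     steps = 0
--     while True:
--         cnt = {}
--         for p in positions:
--             cnt[p] = cnt.get(p, 0) + 1
--         pull = {}
--         less = 0
--         for v in sorted(cnt):
--             c = cnt[v]
--             pull[v] = (n - less - c) - less
--             less += c
--         for i in range(n):
--             velocities[i] += pull[positions[i]]
--             positions[i] += velocities[i]
--         steps += 1
--         if first == tuple(positions) + tuple(velocities):
--             return steps
-- ===== Notes on version B (the rewrite author's own statement) =====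
-- stated objective: faster
-- what changed: Each simulation step now computes every moon's velocity change at once from a counter of positions and one prefix-sum sweep over the sorted distinct positions ((#greater)-(#less)), replacing A's O(n^2) pairwise double loop; the outer simulate-until-initial-state loop is unchanged.
import Mathlib
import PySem

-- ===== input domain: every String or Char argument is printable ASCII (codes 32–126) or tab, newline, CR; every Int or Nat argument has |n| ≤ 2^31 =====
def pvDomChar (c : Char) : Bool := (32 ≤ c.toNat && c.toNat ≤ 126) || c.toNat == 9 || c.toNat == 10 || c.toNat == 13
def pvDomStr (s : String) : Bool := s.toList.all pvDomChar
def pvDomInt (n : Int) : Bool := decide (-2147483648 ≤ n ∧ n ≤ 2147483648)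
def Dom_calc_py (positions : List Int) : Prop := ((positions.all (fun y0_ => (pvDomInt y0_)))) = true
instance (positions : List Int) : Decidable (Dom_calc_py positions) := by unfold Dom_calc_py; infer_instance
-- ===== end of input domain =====

-- B replaces A's O(n^2)-per-step pairwise double loop by one counting pass per step: a counter dict of the
-- positions plus a single prefix-sum sweep over the sorted distinct positions gives every moon's velocity
-- change ((#strictly greater) - (#strictly less)) at once; the outer simulate-until-initial-state loop is
-- unchanged.  A mutates the caller's `positions` list in place and B performs the same mutation; the
-- equivalence proved here is about the return value.  Python's `while True:` carries no bound, so both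
-- ports run the loop under the same large fuel (10^18 steps, returning 0 if it were ever exhausted) and the
-- proved equality A = B is unconditional (on inputs where A's loop never returns — e.g. [-3, -2, 0, 2],
-- where the moons drift apart without bound — neither program returns, and nothing is claimed).

-- ===== PORT A =====
def pvFuel : Nat := 1000000000000000000

def calcAVel (pos vel : List Int) : List Int :=
  (PySem.List.pyRange 0 (pos.length : Int)).foldl (fun v idx =>
    (PySem.List.pyRange 0 (pos.length : Int)).foldl (fun v idx2 =>
      if idx ≠ idx2 then
        if PySem.List.pyGetD pos idx 0 > PySem.List.pyGetD pos idx2 0 then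
          PySem.List.pySetD v idx (PySem.List.pyGetD v idx 0 - 1)
        else if PySem.List.pyGetD pos idx 0 < PySem.List.pyGetD pos idx2 0 then
          PySem.List.pySetD v idx (PySem.List.pyGetD v idx 0 + 1)
        else v
      else v) v) vel

def calcAPos (pos vel' : List Int) : List Int :=
  (PySem.List.pyRange 0 (pos.length : Int)).foldl (fun p idx =>
    PySem.List.pySetD p idx (PySem.List.pyGetD p idx 0 + PySem.List.pyGetD vel' idx 0)) pos

def calcALoop : Nat → List Int → List Int → List Int → Int → Int
  | 0, _, _, _, _ => 0
  | fuel+1, pos, vel, first, steps =>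
    let vel' := calcAVel pos vel
    let pos' := calcAPos pos vel'
    let steps' := steps + 1
    if first = pos' ++ vel' then steps' else calcALoop fuel pos' vel' first steps'

def calc_py (positions : List Int) : Int :=
  let velocities := List.replicate positions.length (0 : Int)
  calcALoop pvFuel positions velocities (positions ++ velocities) 0


-- ===== PORT B =====
-- ===== the pull dictionary =====

def pvCnt (pos : List Int) : PySem.Dict Int Int :=
  pos.foldl (fun (d : PySem.Dict Int Int) p => d.insert p (d.getD p 0 + 1)) PySem.Dict.empty

def pvPullStep (cnt : PySem.Dict Int Int) (n : Int)
    (s : PySem.Dict Int Int × Int) (v : Int) : PySem.Dict Int Int × Int :=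
  let c := cnt.getD v 0
  (s.1.insert v ((n - s.2 - c) - s.2), s.2 + c)

def calcBStep (pos vel : List Int) : List Int × List Int :=
  let pull := ((PySem.List.sorted (pvCnt pos).keys (fun x => x)).foldl
    (pvPullStep (pvCnt pos) (pos.length : Int)) (PySem.Dict.empty, 0)).1
  (PySem.List.pyRange 0 (pos.length : Int)).foldl
    (fun (s : List Int × List Int) i =>
      let v' := PySem.List.pySetD s.2 i
        (PySem.List.pyGetD s.2 i 0 + pull.getD (PySem.List.pyGetD s.1 i 0) 0)
      (PySem.List.pySetD s.1 i (PySem.List.pyGetD s.1 i 0 + PySem.List.pyGetD v' i 0), v'))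
    (pos, vel)

def calcBLoop : Nat → List Int → List Int → List Int → Int → Int
  | 0, _, _, _, _ => 0
  | fuel+1, pos, vel, first, steps =>
    let pv := calcBStep pos vel
    let steps' := steps + 1
    if first = pv.1 ++ pv.2 then steps' else calcBLoop fuel pv.1 pv.2 first steps'

def calc_py_alt (positions : List Int) : Int :=
  let velocities := List.replicate positions.length (0 : Int)
  calcBLoop pvFuel positions velocities (positions ++ velocities) 0


-- ===== PRECONDITION & SPEC =====
def Spec_calc_py (positions : List Int) (out : Int) : Prop := out = calc_py_alt positions
instance (positions : List Int) (out : Int) : Decidable (Spec_calc_py positions out) := by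
  unfold Spec_calc_py; infer_instance

-- ===== CLAIM (what is proved, stated in full; the proofs are below) =====
def Claim_equal_calc_py : Prop :=
  ∀ (positions : List Int), Dom_calc_py positions → Spec_calc_py positions (calc_py positions)

-- ===== LEMMAS AND PROOFS =====

lemma pyGetD_append_cons (pre suf : List Int) (x d : Int) :
    PySem.List.pyGetD (pre ++ x :: suf) (pre.length : Int) d = x := by
  rw [PySem.List.pyGetD_natCast]
  simp [List.getD]

lemma pySetD_append_cons (pre suf : List Int) (x v : Int) :
    PySem.List.pySetD (pre ++ x :: suf) (pre.length : Int) v = pre ++ v :: suf := by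
  rw [PySem.List.pySetD_natCast]
  rw [List.set_append_right _ _ (le_refl _)]
  simp

lemma pyGetD_append_cons' (pre suf : List Int) (x d : Int) (i : Int) (hi : i = (pre.length : Int)) :
    PySem.List.pyGetD (pre ++ x :: suf) i d = x := by
  rw [hi, pyGetD_append_cons]

lemma pySetD_append_cons' (pre suf : List Int) (x v : Int) (i : Int) (hi : i = (pre.length : Int)) :
    PySem.List.pySetD (pre ++ x :: suf) i v = pre ++ v :: suf := by
  rw [hi, pySetD_append_cons]

lemma pyGetD_getElem (pos : List Int) (k : Nat) (hk : k < pos.length) (d : Int) :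
    PySem.List.pyGetD pos (k : Int) d = pos[k] := by
  rw [PySem.List.pyGetD_natCast]
  exact List.getD_eq_getElem _ _ hk

-- sign of the pull that a moon at q exerts on a moon at p
def pvSign (p q : Int) : Int := if p > q then -1 else if p < q then 1 else 0

def pvDelta (pos : List Int) (p : Int) : Int :=
  (pos.countP (fun q => decide (p < q)) : Int) - (pos.countP (fun q => decide (q < p)) : Int)

def pvContrib (pos : List Int) (idx idx2 : Int) : Int :=
  if idx ≠ idx2 then pvSign (PySem.List.pyGetD pos idx 0) (PySem.List.pyGetD pos idx2 0) else 0

lemma sum_sign (pos : List Int) (p : Int) :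
    (pos.map (fun q => pvSign p q)).sum = pvDelta pos p := by
  induction pos with
  | nil => simp [pvDelta]
  | cons a l ih =>
    simp only [List.map_cons, List.sum_cons, pvDelta, List.countP_cons] at *
    rcases lt_trichotomy p a with h | h | h
    · rw [pvSign, if_neg (by omega), if_pos h]
      simp only [decide_eq_true_eq, if_pos h, if_neg (by omega : ¬ a < p)]
      push_cast; omega
    · rw [pvSign, if_neg (by omega), if_neg (by omega)]
      simp only [decide_eq_true_eq, if_neg (by omega : ¬ p < a), if_neg (by omega : ¬ a < p)]
      push_cast; omega
    · rw [pvSign, if_pos h]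
      simp only [decide_eq_true_eq, if_neg (by omega : ¬ p < a), if_pos h]
      push_cast; omega

-- A's inner idx2-loop adds the summed contributions to entry idx of the velocity list
lemma innerA (pos : List Int) (L : List Int) :
    ∀ (pre suf : List Int) (x : Int),
    L.foldl (fun v idx2 =>
        if (pre.length : Int) ≠ idx2 then
          if PySem.List.pyGetD pos (pre.length : Int) 0 > PySem.List.pyGetD pos idx2 0 then
            PySem.List.pySetD v (pre.length : Int) (PySem.List.pyGetD v (pre.length : Int) 0 - 1)
          else if PySem.List.pyGetD pos (pre.length : Int) 0 < PySem.List.pyGetD pos idx2 0 then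
            PySem.List.pySetD v (pre.length : Int) (PySem.List.pyGetD v (pre.length : Int) 0 + 1)
          else v
        else v) (pre ++ x :: suf)
      = pre ++ (x + (L.map (fun idx2 => pvContrib pos (pre.length : Int) idx2)).sum) :: suf := by
  induction L with
  | nil => simp
  | cons c L ih =>
    intro pre suf x
    simp only [List.foldl_cons, List.map_cons, List.sum_cons]
    have hstep : (if (pre.length : Int) ≠ c then
          if PySem.List.pyGetD pos (pre.length : Int) 0 > PySem.List.pyGetD pos c 0 then
            PySem.List.pySetD (pre ++ x :: suf) (pre.length : Int) (PySem.List.pyGetD (pre ++ x :: suf) (pre.length : Int) 0 - 1)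
          else if PySem.List.pyGetD pos (pre.length : Int) 0 < PySem.List.pyGetD pos c 0 then
            PySem.List.pySetD (pre ++ x :: suf) (pre.length : Int) (PySem.List.pyGetD (pre ++ x :: suf) (pre.length : Int) 0 + 1)
          else (pre ++ x :: suf)
        else (pre ++ x :: suf))
        = pre ++ (x + pvContrib pos (pre.length : Int) c) :: suf := by
      rw [pyGetD_append_cons]
      unfold pvContrib pvSign
      split_ifs <;> simp [pySetD_append_cons, sub_eq_add_neg]
    rw [hstep, ih]
    congr 2
    ring

lemma contrib_sum (pos : List Int) (k : Nat) (hk : k < pos.length) :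
    ((PySem.List.pyRange 0 (pos.length : Int)).map (fun idx2 => pvContrib pos (k : Int) idx2)).sum
      = pvDelta pos pos[k] := by
  have h1 : (PySem.List.pyRange 0 (pos.length : Int)).map (fun idx2 => pvContrib pos (k : Int) idx2)
      = (PySem.List.pyRange 0 (pos.length : Int)).map
          (fun idx2 => pvSign pos[k] (PySem.List.pyGetD pos idx2 0)) := by
    apply List.map_congr_left
    intro j hj
    rw [PySem.List.mem_pyRange_one] at hj
    unfold pvContrib
    by_cases hjk : (k : Int) = j
    · subst hjk
      rw [if_neg (by simp), pyGetD_getElem pos k hk]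
      simp [pvSign]
    · rw [if_pos hjk, pyGetD_getElem pos k hk]
  rw [h1,
    show (fun idx2 => pvSign pos[k] (PySem.List.pyGetD pos idx2 0))
        = (pvSign pos[k] ∘ fun j => PySem.List.pyGetD pos j 0) from rfl,
    ← List.map_map, PySem.List.map_pyGetD_pyRange_zero', sum_sign]

-- generic index-updating loop over a list: entry i becomes u i (old entry)
lemma foldl_update (f : List Int → Int → List Int) (u : Int → Int → Int)
    (hf : ∀ (pre suf : List Int) (x : Int),
      f (pre ++ x :: suf) (pre.length : Int) = pre ++ u (pre.length : Int) x :: suf) :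
    ∀ (suf pre : List Int),
    (PySem.List.pyRange (pre.length : Int) ((pre.length + suf.length : Nat) : Int)).foldl f (pre ++ suf)
      = pre ++ (PySem.List.enumerate suf (pre.length : Int)).map (fun q => u q.1 q.2) := by
  intro suf
  induction suf with
  | nil =>
    intro pre
    rw [PySem.List.pyRange_one_eq_nil (by simp)]
    simp [PySem.List.enumerate]
  | cons x suf ih =>
    intro pre
    rw [PySem.List.pyRange_one_cons (by push_cast [List.length_cons]; omega)]
    simp only [List.foldl_cons]
    rw [hf]
    have h3 : pre ++ u (pre.length : Int) x :: suf = (pre ++ [u (pre.length : Int) x]) ++ suf := by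
      simp
    have h4 : ((pre.length : Int) + 1) = (((pre ++ [u (pre.length : Int) x]).length : Nat) : Int) := by
      simp
    have h5 : ((pre.length + (x :: suf).length : Nat) : Int)
        = (((pre ++ [u (pre.length : Int) x]).length + suf.length : Nat) : Int) := by
      simp; push_cast; omega
    rw [h3, h4, h5, ih]
    simp [PySem.List.enumerate_cons]

-- paired version: simultaneous index update of two same-length lists
lemma foldl_update_pair (f : List Int × List Int → Int → List Int × List Int)
    (g h : Int → Int → Int → Int)
    (hf : ∀ (ppre psuf vpre vsuf : List Int) (x y : Int), vpre.length = ppre.length →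
      f (ppre ++ x :: psuf, vpre ++ y :: vsuf) (ppre.length : Int)
        = (ppre ++ g (ppre.length : Int) x y :: psuf, vpre ++ h (ppre.length : Int) x y :: vsuf)) :
    ∀ (pz : List (Int × Int)) (ppre vpre : List Int), vpre.length = ppre.length →
    (PySem.List.pyRange (ppre.length : Int) ((ppre.length + pz.length : Nat) : Int)).foldl f
        (ppre ++ pz.map (·.1), vpre ++ pz.map (·.2))
      = (ppre ++ (PySem.List.enumerate pz (ppre.length : Int)).map (fun q => g q.1 q.2.1 q.2.2),
         vpre ++ (PySem.List.enumerate pz (ppre.length : Int)).map (fun q => h q.1 q.2.1 q.2.2)) := by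
  intro pz
  induction pz with
  | nil =>
    intro ppre vpre hlen
    rw [PySem.List.pyRange_one_eq_nil (by simp)]
    simp [PySem.List.enumerate]
  | cons xy pz ih =>
    intro ppre vpre hlen
    rw [PySem.List.pyRange_one_cons (by push_cast [List.length_cons]; omega)]
    simp only [List.foldl_cons, List.map_cons]
    rw [hf _ _ _ _ _ _ hlen]
    have hlen' : (vpre ++ [h (ppre.length : Int) xy.1 xy.2]).length
        = (ppre ++ [g (ppre.length : Int) xy.1 xy.2]).length := by simp [hlen]
    have h3 : ppre ++ g (ppre.length : Int) xy.1 xy.2 :: pz.map (·.1)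
        = (ppre ++ [g (ppre.length : Int) xy.1 xy.2]) ++ pz.map (·.1) := by simp
    have h3' : vpre ++ h (ppre.length : Int) xy.1 xy.2 :: pz.map (·.2)
        = (vpre ++ [h (ppre.length : Int) xy.1 xy.2]) ++ pz.map (·.2) := by simp
    have h4 : ((ppre.length : Int) + 1)
        = (((ppre ++ [g (ppre.length : Int) xy.1 xy.2]).length : Nat) : Int) := by simp
    have h5 : ((ppre.length + (xy :: pz).length : Nat) : Int)
        = (((ppre ++ [g (ppre.length : Int) xy.1 xy.2]).length + pz.length : Nat) : Int) := by
      simp; omega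
    rw [h3, h3', h4, h5, ih _ _ hlen']
    simp [PySem.List.enumerate_cons, hlen]

lemma foldl_update_zero (f : List Int → Int → List Int) (u : Int → Int → Int)
    (hf : ∀ (pre suf : List Int) (x : Int),
      f (pre ++ x :: suf) (pre.length : Int) = pre ++ u (pre.length : Int) x :: suf)
    (suf : List Int) :
    (PySem.List.pyRange 0 (suf.length : Int)).foldl f suf
      = (PySem.List.enumerate suf 0).map (fun q => u q.1 q.2) := by
  have := foldl_update f u hf suf []
  simpa using this

lemma foldl_update_pair_zero (f : List Int × List Int → Int → List Int × List Int)
    (g h : Int → Int → Int → Int)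
    (hf : ∀ (ppre psuf vpre vsuf : List Int) (x y : Int), vpre.length = ppre.length →
      f (ppre ++ x :: psuf, vpre ++ y :: vsuf) (ppre.length : Int)
        = (ppre ++ g (ppre.length : Int) x y :: psuf, vpre ++ h (ppre.length : Int) x y :: vsuf))
    (pz : List (Int × Int)) :
    (PySem.List.pyRange 0 (pz.length : Int)).foldl f (pz.map (·.1), pz.map (·.2))
      = ((PySem.List.enumerate pz 0).map (fun q => g q.1 q.2.1 q.2.2),
         (PySem.List.enumerate pz 0).map (fun q => h q.1 q.2.1 q.2.2)) := by
  have := foldl_update_pair f g h hf pz [] [] rfl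
  simpa using this

lemma stepA_vel (pos vel : List Int) (hlen : vel.length = pos.length) :
    (PySem.List.pyRange 0 (pos.length : Int)).foldl (fun v idx =>
      (PySem.List.pyRange 0 (pos.length : Int)).foldl (fun v idx2 =>
        if idx ≠ idx2 then
          if PySem.List.pyGetD pos idx 0 > PySem.List.pyGetD pos idx2 0 then
            PySem.List.pySetD v idx (PySem.List.pyGetD v idx 0 - 1)
          else if PySem.List.pyGetD pos idx 0 < PySem.List.pyGetD pos idx2 0 then
            PySem.List.pySetD v idx (PySem.List.pyGetD v idx 0 + 1)
          else v
        else v) v) vel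
    = List.zipWith (fun p v => v + pvDelta pos p) pos vel := by
  rw [← hlen]
  rw [foldl_update_zero _
    (fun i x => x + ((PySem.List.pyRange 0 (vel.length : Int)).map
        (fun idx2 => pvContrib pos i idx2)).sum)
    (fun pre suf x => innerA pos _ pre suf x)]
  apply List.ext_getElem
  · simp [PySem.List.length_enumerate, hlen]
  · intro k hk1 hk2
    have hkv : k < vel.length := by
      simpa [PySem.List.length_enumerate] using hk1
    have hkp : k < pos.length := by omega
    rw [List.getElem_map, PySem.List.getElem_enumerate, List.getElem_zipWith]
    simp only [zero_add]
    simp only [hlen]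
    rw [contrib_sum pos k hkp]

lemma stepA_pos (pos W : List Int) (hW : W.length = pos.length) :
    (PySem.List.pyRange 0 (pos.length : Int)).foldl (fun p idx =>
        PySem.List.pySetD p idx (PySem.List.pyGetD p idx 0 + PySem.List.pyGetD W idx 0)) pos
      = List.zipWith (fun p w => p + w) pos W := by
  rw [foldl_update_zero _ (fun i x => x + PySem.List.pyGetD W i 0)
    (by
      intro pre suf x
      rw [pyGetD_append_cons, pySetD_append_cons])]
  apply List.ext_getElem
  · simp [PySem.List.length_enumerate, hW]
  · intro k hk1 hk2
    have hkp : k < pos.length := by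
      simpa [PySem.List.length_enumerate] using hk1
    have hkW : k < W.length := by omega
    rw [List.getElem_map, PySem.List.getElem_enumerate, List.getElem_zipWith]
    simp only [zero_add]
    rw [pyGetD_getElem W k hkW]

lemma stepB_pair (pos vel : List Int) (pull : PySem.Dict Int Int) (hlen : vel.length = pos.length) :
    (PySem.List.pyRange 0 ((pos.length : Int))).foldl
      (fun (s : List Int × List Int) i =>
        let v' := PySem.List.pySetD s.2 i
          (PySem.List.pyGetD s.2 i 0 + pull.getD (PySem.List.pyGetD s.1 i 0) 0)
        (PySem.List.pySetD s.1 i (PySem.List.pyGetD s.1 i 0 + PySem.List.pyGetD v' i 0), v'))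
      (pos, vel)
    = (List.zipWith (fun p v => p + (v + pull.getD p 0)) pos vel,
       List.zipWith (fun p v => v + pull.getD p 0) pos vel) := by
  have hfst : (pos.zip vel).map (·.1) = pos := List.map_fst_zip (le_of_eq hlen.symm)
  have hsnd : (pos.zip vel).map (·.2) = vel := List.map_snd_zip (le_of_eq hlen)
  have hlz : (pos.zip vel).length = pos.length := by simp [List.length_zip, hlen]
  have key := foldl_update_pair_zero
    (fun (s : List Int × List Int) i =>
        let v' := PySem.List.pySetD s.2 i
          (PySem.List.pyGetD s.2 i 0 + pull.getD (PySem.List.pyGetD s.1 i 0) 0)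
        (PySem.List.pySetD s.1 i (PySem.List.pyGetD s.1 i 0 + PySem.List.pyGetD v' i 0), v'))
    (fun _ x y => x + (y + pull.getD x 0)) (fun _ x y => y + pull.getD x 0)
    (by
      intro ppre psuf vpre vsuf x y hl
      have hi : ((ppre.length : Nat) : Int) = ((vpre.length : Nat) : Int) := by rw [hl]
      simp only
      rw [pyGetD_append_cons' ppre psuf x 0 _ rfl,
          pyGetD_append_cons' vpre vsuf y 0 _ hi,
          pySetD_append_cons' vpre vsuf y _ _ hi,
          pyGetD_append_cons' vpre vsuf _ 0 _ hi,
          pySetD_append_cons' ppre psuf x _ _ rfl])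
    (pos.zip vel)
  rw [hfst, hsnd, hlz] at key
  rw [key]
  simp only [Prod.mk.injEq]
  constructor <;>
  · apply List.ext_getElem
    · simp [PySem.List.length_enumerate, List.length_zip, hlen]
    · intro k hk1 hk2
      have hkz : k < (pos.zip vel).length := by
        simpa [PySem.List.length_enumerate] using hk1
      have hkp : k < pos.length := by omega
      have hkv : k < vel.length := by simp [List.length_zip] at hkz; omega
      rw [List.getElem_map, PySem.List.getElem_enumerate, List.getElem_zipWith]
      simp [List.getElem_zip]

lemma pull_untouched (cnt : PySem.Dict Int Int) (n : Int) :
    ∀ (K : List Int) (d : PySem.Dict Int Int) (acc : Int) (p : Int), p ∉ K →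
    ((K.foldl (pvPullStep cnt n) (d, acc)).1).getD p 0 = d.getD p 0 := by
  intro K
  induction K with
  | nil => intro d acc p _; rfl
  | cons k K ih =>
    intro d acc p hp
    simp only [List.foldl_cons, pvPullStep]
    rw [ih _ _ _ (by simp at hp; exact hp.2)]
    exact PySem.Dict.getD_insert_of_ne _ _ _ (by simp at hp; exact hp.1)

lemma pull_getD (cnt : PySem.Dict Int Int) (n : Int) :
    ∀ (K : List Int), K.Pairwise (· < ·) →
    ∀ (d : PySem.Dict Int Int) (acc : Int) (p : Int), p ∈ K →
    ((K.foldl (pvPullStep cnt n) (d, acc)).1).getD p 0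
      = (n - (acc + ((K.filter (fun w => decide (w < p))).map (fun w => cnt.getD w 0)).sum)
            - cnt.getD p 0)
        - (acc + ((K.filter (fun w => decide (w < p))).map (fun w => cnt.getD w 0)).sum) := by
  intro K
  induction K with
  | nil => intro _ d acc p hp; simp at hp
  | cons k K ih =>
    intro hpw d acc p hp
    have hkK : ∀ w ∈ K, k < w := fun w hw => (List.pairwise_cons.mp hpw).1 w hw
    have hKpw : K.Pairwise (· < ·) := (List.pairwise_cons.mp hpw).2
    simp only [List.foldl_cons]
    rcases List.mem_cons.mp hp with rfl | hpK
    · -- p = k : its entry is written now and never touched again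
      have hnotin : p ∉ K := fun hin => lt_irrefl p (hkK p hin)
      rw [pull_untouched cnt n K _ _ _ hnotin]
      simp only [pvPullStep, PySem.Dict.getD_insert_self]
      have hfilter : (p :: K).filter (fun w => decide (w < p)) = [] := by
        rw [List.filter_eq_nil_iff]
        intro w hw
        rcases List.mem_cons.mp hw with rfl | hwK
        · simp
        · simpa using not_lt.mpr (le_of_lt (hkK w hwK))
      rw [hfilter]
      simp
    · -- p comes later
      have hkp : k < p := hkK p hpK
      rw [ih hKpw _ _ _ hpK]
      have hfilter : (k :: K).filter (fun w => decide (w < p))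
          = k :: K.filter (fun w => decide (w < p)) := by
        simp [List.filter_cons, hkp]
      rw [hfilter]
      simp only [List.map_cons, List.sum_cons, pvPullStep]
      ring_nf

lemma sum_indicator (M : List Int) (a : Int) (hM : M.Nodup) :
    (M.map (fun w => if w = a then (1 : Int) else 0)).sum = if a ∈ M then 1 else 0 := by
  induction M with
  | nil => simp
  | cons m M ih =>
    have hM' : M.Nodup := (List.nodup_cons.mp hM).2
    have hm : m ∉ M := (List.nodup_cons.mp hM).1
    simp only [List.map_cons, List.sum_cons, ih hM', List.mem_cons]
    by_cases hma : m = a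
    · subst hma
      simp [hm]
    · simp [hma, Ne.symm hma]

lemma sum_counts (p : Int) (K : List Int) (hK : K.Nodup) :
    ∀ (l : List Int), (∀ q ∈ l, q ∈ K) →
    ((K.filter (fun w => decide (w < p))).map (fun w => (l.count w : Int))).sum
      = (l.countP (fun q => decide (q < p)) : Int) := by
  intro l
  induction l with
  | nil => simp
  | cons a l ih =>
    intro hl
    have ha : a ∈ K := hl a (List.mem_cons_self)
    have hcc : ∀ w, (((a :: l).count w) : Int) = (l.count w : Int) + (if w = a then 1 else 0) := by
      intro w
      rw [List.count_cons]
      push_cast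
      congr 1
      by_cases hwa : w = a
      · simp [hwa]
      · simp [hwa]
        exact fun h => hwa h.symm
    rw [List.map_congr_left (fun w _ => hcc w), PySem.List.sum_map_add_int,
      ih (fun q hq => hl q (List.mem_cons_of_mem a hq)),
      sum_indicator _ _ (List.Nodup.filter _ hK)]
    have hmem : a ∈ K.filter (fun w => decide (w < p)) ↔ a < p := by
      simp [List.mem_filter, ha]
    rw [List.countP_cons]
    by_cases hap : a < p
    · rw [if_pos (hmem.mpr hap)]
      simp [hap]
    · rw [if_neg (fun h => hap (hmem.mp h))]
      simp [hap]

lemma length_split (p : Int) (l : List Int) :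
    l.countP (fun q => decide (q < p)) + l.count p + l.countP (fun q => decide (p < q))
      = l.length := by
  induction l with
  | nil => simp
  | cons a l ih =>
    rw [List.countP_cons, List.countP_cons, List.count_cons, List.length_cons, ← ih]
    rcases lt_trichotomy a p with h | h | h <;>
      · simp only [h]
        by_cases h1 : a < p <;> by_cases h2 : p < a <;> by_cases h3 : a = p <;>
          first
          | omega
          | (simp [h1, h2, h3] <;> omega)

lemma pull_spec (pos : List Int) (p : Int) (hp : p ∈ pos) :
    (((PySem.List.sorted (pvCnt pos).keys (fun x => x)).foldl
        (pvPullStep (pvCnt pos) (pos.length : Int)) (PySem.Dict.empty, 0)).1).getD p 0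
      = pvDelta pos p := by
  have hcnt : pvCnt pos = PySem.Dict.counter pos :=
    PySem.Dict.foldl_insert_getD_add_one_eq_counter pos
  rw [hcnt, PySem.Dict.keys_counter]
  have hpw := PySem.List.sorted_ofList_pairwise_lt pos
  set K := PySem.List.sorted (PySem.Set.ofList pos) (fun x => x) with hKdef
  have hK : K.Nodup := hpw.imp ne_of_lt
  have hmemK : ∀ q, q ∈ K ↔ q ∈ pos := fun q =>
    (PySem.List.mem_sorted _ _ _ q).trans (PySem.Set.mem_ofList pos q)
  rw [pull_getD _ _ K hpw _ _ p ((hmemK p).mpr hp)]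
  have hmap : (K.filter (fun w => decide (w < p))).map
        (fun w => (PySem.Dict.counter pos).getD w 0)
      = (K.filter (fun w => decide (w < p))).map (fun w => (pos.count w : Int)) :=
    List.map_congr_left (fun w _ => PySem.Dict.getD_counter pos w)
  rw [hmap, sum_counts p K hK pos (fun q hq => (hmemK q).mpr hq),
    PySem.Dict.getD_counter]
  have hsplit := length_split p pos
  unfold pvDelta
  push_cast
  omega

-- ===== step equality and the loop =====

lemma step_eq (pos vel : List Int) (hlen : vel.length = pos.length) :
    calcBStep pos vel = (calcAPos pos (calcAVel pos vel), calcAVel pos vel) := by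
  have hV : calcAVel pos vel = List.zipWith (fun p v => v + pvDelta pos p) pos vel :=
    stepA_vel pos vel hlen
  have hVlen : (calcAVel pos vel).length = pos.length := by
    rw [hV]; simp [List.length_zipWith, hlen]
  have hP : calcAPos pos (calcAVel pos vel)
      = List.zipWith (fun p w => p + w) pos (calcAVel pos vel) :=
    stepA_pos pos _ hVlen
  unfold calcBStep
  rw [stepB_pair pos vel _ hlen]
  simp only [Prod.mk.injEq]
  constructor
  · rw [hP, hV]
    apply List.ext_getElem
    · simp [List.length_zipWith, hlen]
    · intro k hk1 hk2
      simp only [List.getElem_zipWith]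
      congr 1
      have hkp : k < pos.length := by simp [List.length_zipWith, hlen] at hk1; omega
      rw [pull_spec pos pos[k] (List.getElem_mem hkp)]
  · rw [hV]
    apply List.ext_getElem
    · simp [List.length_zipWith, hlen]
    · intro k hk1 hk2
      simp only [List.getElem_zipWith]
      have hkp : k < pos.length := by simp [List.length_zipWith, hlen] at hk1; omega
      rw [pull_spec pos pos[k] (List.getElem_mem hkp)]

lemma loop_eq : ∀ (fuel : Nat) (pos vel first : List Int) (steps : Int),
    vel.length = pos.length →
    calcALoop fuel pos vel first steps = calcBLoop fuel pos vel first steps := by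
  intro fuel
  induction fuel with
  | zero => intro pos vel first steps _; rfl
  | succ fuel ih =>
    intro pos vel first steps hlen
    simp only [calcALoop, calcBLoop, step_eq pos vel hlen]
    have hV : calcAVel pos vel = List.zipWith (fun p v => v + pvDelta pos p) pos vel :=
      stepA_vel pos vel hlen
    have hVlen : (calcAVel pos vel).length = pos.length := by
      rw [hV]; simp [List.length_zipWith, hlen]
    have hP : calcAPos pos (calcAVel pos vel)
        = List.zipWith (fun p w => p + w) pos (calcAVel pos vel) :=
      stepA_pos pos _ hVlen
    have hPlen : (calcAPos pos (calcAVel pos vel)).length = pos.length := by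
      rw [hP]; simp [List.length_zipWith, hVlen]
    split_ifs with h
    · rfl
    · exact ih _ _ _ _ (by rw [hVlen, hPlen])

lemma final_eq (positions : List Int) : calc_py positions = calc_py_alt positions := by
  unfold calc_py calc_py_alt
  exact loop_eq pvFuel positions _ _ 0 (by simp)

-- ===== VERDICT (by name: the statement is the Claim_ definition above) =====
theorem calc_py_spec : Claim_equal_calc_py := by
  intro positions _
  exact final_eq positions
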